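-- pv_equiv track=rewrite | github.com/byrn-baker/Nautobot-Workshop | nautobot-docker-compose/jobs/auto_config_interface_dispatcher.py | _strip_extraneous_bang_lines
-- ===== SOURCE A (Python) =====
-- def _strip_extraneous_bang_lines(lines):
--     cleaned = []
--     for line in lines:
--         if line.strip() == "!" and (not cleaned or cleaned[-1].strip() == "!"):
--             continue
--         cleaned.append(line)
--     while cleaned and cleaned[0].strip() == "!":
--         cleaned.pop(0)
--     while cleaned and cleaned[-1].strip() == "!":
--         cleaned.pop(-1)
--     return cleaned
-- ===== SOURCE B (Python) =====
-- def _strip_extraneous_bang_lines(lines):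
--     # Group-first decomposition: split lines into maximal runs of bang / non-bang
--     # lines, drop a leading and a trailing bang run, collapse each remaining
--     # bang run to its first line, and flatten.
--     groups = []
--     for line in lines:
--         b = line.strip() == "!"
--         if groups and groups[-1][0] == b:
--             groups[-1][1].append(line)
--         else:
--             groups.append((b, [line]))
--     if groups and groups[0][0]:
--         groups.pop(0)
--     if groups and groups[-1][0]:
--         groups.pop()
--     return [item for b, items in groups for item in (items[:1] if b else items)]
-- ===== Notes on version B (the rewrite author's own statement) =====
-- stated objective: alternative
-- what changed: Replaced A's lookback stream filter plus two pop-loops by a group-first pass: split the input into maximal runs of bang/non-bang lines, drop a leading and a trailing bang run, emit only the first line of each remaining bang run, and flatten.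
import Mathlib
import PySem

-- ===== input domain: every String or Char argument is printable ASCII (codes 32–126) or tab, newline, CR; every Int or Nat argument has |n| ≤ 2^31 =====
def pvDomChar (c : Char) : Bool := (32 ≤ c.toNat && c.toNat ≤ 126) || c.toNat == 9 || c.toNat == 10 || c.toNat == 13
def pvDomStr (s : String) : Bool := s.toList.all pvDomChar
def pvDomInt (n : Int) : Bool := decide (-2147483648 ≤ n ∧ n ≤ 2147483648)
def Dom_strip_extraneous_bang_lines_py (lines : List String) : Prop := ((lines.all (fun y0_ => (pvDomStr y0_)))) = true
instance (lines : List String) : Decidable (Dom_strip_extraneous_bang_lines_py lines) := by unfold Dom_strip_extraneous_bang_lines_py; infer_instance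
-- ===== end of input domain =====

-- B replaces A's lookback stream filter plus two pop-loops with a group-runs-then-emit
-- decomposition (alternative, same cost); return values proved equal on all inputs.

-- ===== PORT A =====

-- line.strip() == "!"
def pvIsBang (s : String) : Bool := PySem.Str.strip s == "!"

-- the `for line in lines` loop accumulating `cleaned`
-- (Python's `cleaned[-1]` on a list known nonempty by short-circuit = getLastD)
def pvLoopA (lines : List String) (cleaned : List String) : List String :=
  match lines with
  | [] => cleaned
  | l :: rest =>
    if pvIsBang l && (cleaned.isEmpty || pvIsBang (cleaned.getLastD "")) then
      pvLoopA rest cleaned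
    else
      pvLoopA rest (cleaned ++ [l])

-- while cleaned and cleaned[0].strip() == "!": cleaned.pop(0)
def pvFrontA : List String → List String
  | [] => []
  | l :: rest => if pvIsBang l then pvFrontA rest else l :: rest

-- while cleaned and cleaned[-1].strip() == "!": cleaned.pop(-1)
def pvBackA (xs : List String) : List String :=
  match h : xs.getLast? with
  | none => xs
  | some l =>
    if pvIsBang l then pvBackA xs.dropLast else xs
termination_by xs.length
decreasing_by
  have : xs ≠ [] := by intro hn; subst hn; simp at h
  simpa [List.length_dropLast] using Nat.sub_lt (List.length_pos_iff.mpr this) Nat.one_pos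

def strip_extraneous_bang_lines_py (lines : List String) : List String :=
  pvBackA (pvFrontA (pvLoopA lines []))

-- ===== PORT B =====

-- the grouping loop: append into groups[-1][1] when the flag matches, else start a new group
def pvLoopB (lines : List String) (groups : List (Bool × List String)) : List (Bool × List String) :=
  match lines with
  | [] => groups
  | l :: rest =>
    let b := pvIsBang l
    match groups.getLast? with
    | some (gb, items) =>
      if gb == b then pvLoopB rest (groups.dropLast ++ [(gb, items ++ [l])])
      else pvLoopB rest (groups ++ [(b, [l])])
    | none => pvLoopB rest (groups ++ [(b, [l])])

-- if groups and groups[0][0]: groups.pop(0)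
def pvTrimFirstB (groups : List (Bool × List String)) : List (Bool × List String) :=
  match groups with
  | [] => []
  | (b, items) :: rest => if b then rest else (b, items) :: rest

-- if groups and groups[-1][0]: groups.pop()
def pvTrimLastB (groups : List (Bool × List String)) : List (Bool × List String) :=
  match groups.getLast? with
  | some (b, _) => if b then groups.dropLast else groups
  | none => groups

-- the flattening comprehension; items[:1] = take 1 (non-negative literal bounds)
def pvEmitB (groups : List (Bool × List String)) : List String :=
  groups.flatMap (fun g => if g.1 then g.2.take 1 else g.2)

def strip_extraneous_bang_lines_py_alt (lines : List String) : List String :=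
  pvEmitB (pvTrimLastB (pvTrimFirstB (pvLoopB lines [])))

-- ===== PRECONDITION & SPEC =====
def Spec_strip_extraneous_bang_lines_py (lines : List String) (out : List String) : Prop := out = strip_extraneous_bang_lines_py_alt lines
instance (lines : List String) (out : List String) : Decidable (Spec_strip_extraneous_bang_lines_py lines out) := by unfold Spec_strip_extraneous_bang_lines_py; infer_instance

-- ===== CLAIM (what is proved, stated in full; the proofs are below) =====
def Claim_equal_strip_extraneous_bang_lines_py : Prop := ∀ (lines : List String), Dom_strip_extraneous_bang_lines_py lines → Spec_strip_extraneous_bang_lines_py lines (strip_extraneous_bang_lines_py lines)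

-- ===== LEMMAS AND PROOFS =====

-- Common reference function: state `b` = "a bang here is extraneous" (start of input
-- or previous kept line is a bang); a bang kept in state ¬b survives only if the
-- remainder contributes something (otherwise it would be a trailing bang).
def pvG : Bool → List String → List String
  | _, [] => []
  | b, l :: rest =>
    if pvIsBang l then
      if b then pvG true rest
      else if (pvG true rest).isEmpty then [] else l :: pvG true rest
    else l :: pvG false rest

-- A's first loop, accumulator-free
def pvDedup : Bool → List String → List String
  | _, [] => []
  | b, l :: rest =>
    if pvIsBang l then (if b then pvDedup true rest else l :: pvDedup true rest)
    else l :: pvDedup false rest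

theorem pvLoopA_eq (lines : List String) : ∀ cleaned,
    pvLoopA lines cleaned = cleaned ++ pvDedup (cleaned.isEmpty || pvIsBang (cleaned.getLastD "")) lines := by
  induction lines with
  | nil => intro c; simp [pvLoopA, pvDedup]
  | cons l rest ih =>
    intro c
    rw [pvLoopA]
    have hst : ((c ++ [l]).isEmpty || pvIsBang ((c ++ [l]).getLastD "")) = pvIsBang l := by
      simp
    by_cases hcond : (pvIsBang l && (c.isEmpty || pvIsBang (c.getLastD ""))) = true
    · rw [if_pos hcond, ih]
      obtain ⟨hb, hs⟩ := Bool.and_eq_true_iff.mp hcond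
      rw [hs]
      simp [pvDedup, hb]
    · rw [if_neg hcond, ih, hst]
      by_cases hb : pvIsBang l = true
      · have hs : (c.isEmpty || pvIsBang (c.getLastD "")) = false := by
          cases h : (c.isEmpty || pvIsBang (c.getLastD "")) <;> simp_all
        simp [pvDedup, hb]
        simpa using hs
      · have hb' : pvIsBang l = false := by simpa using hb
        simp [pvDedup, hb']

theorem pvFrontA_dedup_true (lines : List String) : pvFrontA (pvDedup true lines) = pvDedup true lines := by
  induction lines with
  | nil => simp [pvDedup, pvFrontA]
  | cons l rest ih =>
    by_cases hb : pvIsBang l = true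
    · simpa [pvDedup, hb] using ih
    · have hb' : pvIsBang l = false := by simpa using hb
      simp [pvDedup, hb', pvFrontA]

theorem pvBackA_eq_dropWhile (xs : List String) :
    pvBackA xs = (xs.reverse.dropWhile pvIsBang).reverse := by
  induction xs using List.reverseRecOn with
  | nil => simp [pvBackA]
  | append_singleton ys l ih =>
    rw [pvBackA]
    split
    · next h => simp at h
    · next x h =>
      have hx : x = l := by
        rw [List.getLast?_concat] at h
        exact (Option.some.inj h).symm
      subst hx
      by_cases hb : pvIsBang x = true
      · simp [hb, List.dropLast_concat, ih, List.dropWhile]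
      · have hb' : pvIsBang x = false := by simpa using hb
        simp [hb', List.dropWhile]

theorem pvBackA_dedup (lines : List String) : ∀ b,
    pvBackA (pvDedup b lines) = pvG b lines := by
  induction lines with
  | nil => intro b; simp [pvDedup, pvG, pvBackA]
  | cons l rest ih =>
    intro b
    have hGr : ∀ b', pvG b' rest = ((pvDedup b' rest).reverse.dropWhile pvIsBang).reverse := by
      intro b'; rw [← ih b', pvBackA_eq_dropWhile]
    rw [pvBackA_eq_dropWhile]
    by_cases hb : pvIsBang l = true
    · cases b with
      | true =>
        rw [pvG, pvDedup]; simp only [hb, if_true]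
        rw [← pvBackA_eq_dropWhile, ih]
      | false =>
        rw [pvG, pvDedup]
        simp only [hb, if_true, Bool.false_eq_true, if_false]
        rw [List.reverse_cons, List.dropWhile_append]
        by_cases he : ((pvDedup true rest).reverse.dropWhile pvIsBang) = []
        · have hG : pvG true rest = [] := by rw [hGr true, he]; rfl
          simp [he, hG, List.dropWhile, hb]
        · have hG : pvG true rest ≠ [] := by
            rw [hGr true]; simpa using he
          simp [he, hG, List.dropWhile, hb, hGr true]
    · have hb' : pvIsBang l = false := by simpa using hb
      rw [pvG, pvDedup]
      simp only [hb', Bool.false_eq_true, if_false]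
      rw [List.reverse_cons, List.dropWhile_append]
      by_cases he : ((pvDedup false rest).reverse.dropWhile pvIsBang) = []
      · have hG : pvG false rest = [] := by rw [hGr false, he]; rfl
        simp [he, hG, List.dropWhile, hb']
      · simp [he, List.dropWhile, hb', hGr false]

theorem pvA_eq_pvG (lines : List String) : strip_extraneous_bang_lines_py lines = pvG true lines := by
  rw [strip_extraneous_bang_lines_py, pvLoopA_eq]
  simp only [List.isEmpty_nil, Bool.true_or, List.nil_append]
  rw [pvFrontA_dedup_true, pvBackA_dedup]

-- B's grouping loop, accumulator-free: continue the current run (flag b, items so far)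
def pvRuns (b : Bool) (items : List String) : List String → List (Bool × List String)
  | [] => [(b, items)]
  | l :: rest =>
    if pvIsBang l == b then pvRuns b (items ++ [l]) rest
    else (b, items) :: pvRuns (pvIsBang l) [l] rest

theorem pvLoopB_eq (lines : List String) : ∀ (G : List (Bool × List String)) b items,
    pvLoopB lines (G ++ [(b, items)]) = G ++ pvRuns b items lines := by
  induction lines with
  | nil => intro G b items; simp [pvLoopB, pvRuns]
  | cons l rest ih =>
    intro G b items
    rw [pvLoopB]
    simp only [List.getLast?_concat, List.dropLast_concat]
    by_cases hb : pvIsBang l == b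
    · have hbb : b == pvIsBang l := by simpa [BEq.comm] using hb
      simp only [hbb, if_true, ih, pvRuns, hb]
    · have hb1 : (b == pvIsBang l) = false := by
        cases b <;> cases h : pvIsBang l <;> simp_all
      have hb2 : (pvIsBang l == b) = false := by
        cases b <;> cases h : pvIsBang l <;> simp_all
      simp only [hb1, Bool.false_eq_true, if_false]
      rw [ih (G ++ [(b, items)])]
      simp [pvRuns, hb2]

theorem pvTrimLastB_cons (x : Bool × List String) (P : List (Bool × List String)) (h : P ≠ []) :
    pvTrimLastB (x :: P) = x :: pvTrimLastB P := by
  induction P using List.reverseRecOn with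
  | nil => cases h rfl
  | append_singleton Q y _ =>
    obtain ⟨yb, yi⟩ := y
    rw [pvTrimLastB, pvTrimLastB]
    rw [show x :: (Q ++ [(yb, yi)]) = (x :: Q) ++ [(yb, yi)] from rfl]
    rw [List.getLast?_concat, List.getLast?_concat, List.dropLast_concat, List.dropLast_concat]
    by_cases hy : yb = true
    · simp [hy]
    · simp [hy]

theorem pvRuns_ne_nil (lines : List String) : ∀ b items, pvRuns b items lines ≠ [] := by
  induction lines with
  | nil => intro b items; simp [pvRuns]
  | cons l rest ih =>
    intro b items
    rw [pvRuns]
    split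
    · exact ih _ _
    · simp

-- joint characterisation of emit∘trimLast on a run decomposition
theorem pvEmit_trimLast_runs (lines : List String) :
    ∀ items h, (items ≠ [] → pvEmitB (pvTrimLastB (pvRuns false items lines)) = items ++ pvG false lines)
      ∧ pvEmitB (pvTrimLastB (pvRuns true (h :: items) lines)) = (if (pvG true lines).isEmpty then [] else h :: pvG true lines) := by
  induction lines with
  | nil =>
    intro items h
    constructor
    · intro _; simp [pvRuns, pvTrimLastB, pvEmitB, pvG]
    · simp [pvRuns, pvTrimLastB, pvEmitB, pvG]
  | cons l rest ih =>
    intro items h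
    by_cases hb : pvIsBang l = true
    · constructor
      · intro hne
        rw [pvRuns]
        simp only [hb, Bool.true_eq_false, beq_iff_eq, if_false]
        rw [pvTrimLastB_cons _ _ (pvRuns_ne_nil _ _ _)]
        rw [pvEmitB, List.flatMap_cons, ← pvEmitB]
        rw [(ih [] l).2]
        rw [pvG]
        simp only [hb, if_true, Bool.false_eq_true, if_false]
      · rw [pvRuns]
        simp only [hb, beq_self_eq_true, if_true, List.cons_append]
        rw [(ih (items ++ [l]) h).2, pvG]
        simp [hb]
    · have hb' : pvIsBang l = false := by simpa using hb
      constructor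
      · intro hne
        rw [pvRuns]
        simp only [hb', beq_self_eq_true, if_true]
        rw [(ih (items ++ [l]) h).1 (by simp), pvG]
        simp [hb']
      · rw [pvRuns]
        simp only [hb', Bool.false_eq_true, beq_iff_eq, if_false]
        rw [pvTrimLastB_cons _ _ (pvRuns_ne_nil _ _ _)]
        rw [pvEmitB, List.flatMap_cons, ← pvEmitB]
        rw [(ih [l] h).1 (by simp), pvG]
        simp [hb', List.take]

theorem pvRuns_head_flag (lines : List String) : ∀ b items g gs,
    pvRuns b items lines = g :: gs → g.1 = b := by
  induction lines with
  | nil =>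
    intro b items g gs h
    rw [pvRuns] at h
    injection h with h1 h2
    rw [← h1]
  | cons l rest ih =>
    intro b items g gs h
    rw [pvRuns] at h
    split at h
    · exact ih _ _ _ _ h
    · injection h with h1 h2
      rw [← h1]

-- the leading bang run (whatever its items) is dropped, and the result is pvG of the remainder
theorem pvB_leading_bang (lines : List String) : ∀ items,
    pvEmitB (pvTrimLastB (pvTrimFirstB (pvRuns true items lines))) = pvG true lines := by
  induction lines with
  | nil => intro items; simp [pvRuns, pvTrimFirstB, pvTrimLastB, pvEmitB, pvG]
  | cons l rest ih =>
    intro items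
    by_cases hb : pvIsBang l = true
    · rw [pvRuns]
      simp only [hb, beq_self_eq_true, if_true]
      rw [ih, pvG]
      simp [hb]
    · have hb' : pvIsBang l = false := by simpa using hb
      rw [pvRuns]
      simp only [hb', Bool.false_eq_true, beq_iff_eq, if_false]
      rw [pvTrimFirstB]
      simp only [if_true]
      have := ((pvEmit_trimLast_runs rest [l] l).1 (by simp))
      rw [this, pvG]
      simp [hb']

theorem pvB_eq_pvG (lines : List String) : strip_extraneous_bang_lines_py_alt lines = pvG true lines := by
  rw [strip_extraneous_bang_lines_py_alt]
  cases lines with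
  | nil => simp [pvLoopB, pvTrimFirstB, pvTrimLastB, pvEmitB, pvG]
  | cons l rest =>
    rw [pvLoopB]
    simp only [List.getLast?_nil]
    rw [show ([] : List (Bool × List String)) ++ [(pvIsBang l, [l])] = [] ++ [(pvIsBang l, [l])] from rfl]
    rw [pvLoopB_eq, List.nil_append]
    by_cases hb : pvIsBang l = true
    · rw [hb, pvB_leading_bang, pvG]
      simp [hb]
    · have hb' : pvIsBang l = false := by simpa using hb
      rw [hb']
      rw [show pvTrimFirstB (pvRuns false [l] rest) = pvRuns false [l] rest by
        cases hr : pvRuns false [l] rest with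
        | nil => rfl
        | cons g gs =>
          have hg : g.1 = false := pvRuns_head_flag rest false [l] g gs hr
          obtain ⟨gb, gi⟩ := g
          simp only at hg
          simp [pvTrimFirstB, hg]]
      rw [(pvEmit_trimLast_runs rest [l] l).1 (by simp)]
      rw [pvG]
      simp [hb']

-- ===== VERDICT (by name: the statement is the Claim_ definition above) =====
theorem strip_extraneous_bang_lines_py_spec : Claim_equal_strip_extraneous_bang_lines_py := by
  intro lines _
  unfold Spec_strip_extraneous_bang_lines_py
  rw [pvA_eq_pvG, pvB_eq_pvG]
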